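-- pv_equiv track=rewrite | github.com/RiverYanggg/SteelDig_multimodal | paper_extractor/knowledge/chunker.py | _split_on_heading_levels
-- ===== SOURCE A (Python) =====
-- from typing import Iterable, List
--
-- def _split_on_heading_levels(
--     items: List[tuple[int, int, int, str, str, int, int]],
--     heading_levels: set[int],
-- ) -> List[List[tuple[int, int, int, str, str, int, int]]]:
--     blocks: List[List[tuple[int, int, int, str, str, int, int]]] = []
--     current: List[tuple[int, int, int, str, str, int, int]] = []
--     for item in items:
--         heading_level = item[6]
--         if current and heading_level in heading_levels:
--             blocks.append(current)
--             current = []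
--         current.append(item)
--     if current:
--         blocks.append(current)
--     return blocks
-- ===== SOURCE B (Python) =====
-- from typing import List
--
-- def _split_on_heading_levels(
--     items: List[tuple[int, int, int, str, str, int, int]],
--     heading_levels: set[int],
-- ) -> List[List[tuple[int, int, int, str, str, int, int]]]:
--     # Two-pointer block scanner: each block starts at i, extends to the next
--     # heading boundary j, and is emitted as the slice items[i:j].
--     blocks: List[List[tuple[int, int, int, str, str, int, int]]] = []
--     n = len(items)
--     i = 0
--     while i < n:
--         j = i + 1
--         while j < n and items[j][6] not in heading_levels:
--             j += 1
--         blocks.append(items[i:j])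
--         i = j
--     return blocks
-- ===== Notes on version B (the rewrite author's own statement) =====
-- stated objective: alternative
-- what changed: Replaced A's append-and-flush accumulator loop (mutable current block flushed at each heading) by a two-pointer scanner that finds each block's end index and emits the block as a slice items[i:j].
import Mathlib
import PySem

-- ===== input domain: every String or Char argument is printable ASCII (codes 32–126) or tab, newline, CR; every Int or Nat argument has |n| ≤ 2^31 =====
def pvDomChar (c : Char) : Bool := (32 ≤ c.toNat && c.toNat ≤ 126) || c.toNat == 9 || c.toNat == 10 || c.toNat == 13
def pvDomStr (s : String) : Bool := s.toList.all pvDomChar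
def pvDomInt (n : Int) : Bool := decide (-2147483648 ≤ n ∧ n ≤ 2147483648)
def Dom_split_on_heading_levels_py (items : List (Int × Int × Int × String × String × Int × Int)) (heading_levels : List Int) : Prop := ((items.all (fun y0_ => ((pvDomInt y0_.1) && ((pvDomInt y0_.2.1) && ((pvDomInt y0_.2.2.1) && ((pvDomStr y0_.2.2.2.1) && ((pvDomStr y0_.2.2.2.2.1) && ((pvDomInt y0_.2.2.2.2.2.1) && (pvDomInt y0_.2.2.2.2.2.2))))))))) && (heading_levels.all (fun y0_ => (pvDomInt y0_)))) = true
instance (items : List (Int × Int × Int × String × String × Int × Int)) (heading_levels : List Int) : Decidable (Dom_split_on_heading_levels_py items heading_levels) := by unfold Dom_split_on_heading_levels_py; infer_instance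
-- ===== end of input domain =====

-- B replaces A's append-and-flush accumulator loop by a two-pointer/slice block scanner (alternative decomposition, same cost).

-- ===== PORT A =====
-- A's for-loop over items carrying (blocks, current), with the trailing flush of current.
def aGo (heading_levels : List Int) :
    List (Int × Int × Int × String × String × Int × Int) →
    List (List (Int × Int × Int × String × String × Int × Int)) →
    List (Int × Int × Int × String × String × Int × Int) →
    List (List (Int × Int × Int × String × String × Int × Int))
  | [], blocks, current => if current = [] then blocks else blocks ++ [current]
  | item :: rest, blocks, current =>
      if current ≠ [] ∧ heading_levels.contains item.2.2.2.2.2.2 then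
        aGo heading_levels rest (blocks ++ [current]) [item]
      else
        aGo heading_levels rest blocks (current ++ [item])

def split_on_heading_levels_py (items : List (Int × Int × Int × String × String × Int × Int)) (heading_levels : List Int) : List (List (Int × Int × Int × String × String × Int × Int)) :=
  aGo heading_levels items [] []

-- ===== PORT B =====
-- B's outer loop: block starts at the current item, the inner scan (takeWhile) extends it
-- to the next heading boundary, the block is the slice, and we continue from the boundary.
def altGo (heading_levels : List Int) :
    List (Int × Int × Int × String × String × Int × Int) →
    List (List (Int × Int × Int × String × String × Int × Int))
  | [] => []
  | x :: rest =>
      (x :: rest.takeWhile (fun y => !(heading_levels.contains y.2.2.2.2.2.2))) ::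
      altGo heading_levels (rest.dropWhile (fun y => !(heading_levels.contains y.2.2.2.2.2.2)))
termination_by l => l.length
decreasing_by
  exact Nat.lt_succ_of_le (List.dropWhile_sublist _).length_le

def split_on_heading_levels_py_alt (items : List (Int × Int × Int × String × String × Int × Int)) (heading_levels : List Int) : List (List (Int × Int × Int × String × String × Int × Int)) :=
  altGo heading_levels items

-- ===== PRECONDITION & SPEC =====
def Spec_split_on_heading_levels_py (items : List (Int × Int × Int × String × String × Int × Int)) (heading_levels : List Int) (out : List (List (Int × Int × Int × String × String × Int × Int))) : Prop := out = split_on_heading_levels_py_alt items heading_levels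
instance (items : List (Int × Int × Int × String × String × Int × Int)) (heading_levels : List Int) (out : List (List (Int × Int × Int × String × String × Int × Int))) : Decidable (Spec_split_on_heading_levels_py items heading_levels out) := by
  unfold Spec_split_on_heading_levels_py
  -- instance search alone exceeds its depth limit on the 7-tuple; assemble it stepwise
  letI d3 : DecidableEq (String × Int × Int) := instDecidableEqProd
  letI d4 : DecidableEq (String × String × Int × Int) := instDecidableEqProd
  letI d5 : DecidableEq (Int × String × String × Int × Int) := instDecidableEqProd
  letI d6 : DecidableEq (Int × Int × String × String × Int × Int) := instDecidableEqProd
  letI d7 : DecidableEq (Int × Int × Int × String × String × Int × Int) := instDecidableEqProd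
  infer_instance

-- ===== CLAIM (what is proved, stated in full; the proofs are below) =====
def Claim_equal_split_on_heading_levels_py : Prop := ∀ (items : List (Int × Int × Int × String × String × Int × Int)) (heading_levels : List Int), Dom_split_on_heading_levels_py items heading_levels → Spec_split_on_heading_levels_py items heading_levels (split_on_heading_levels_py items heading_levels)

-- ===== LEMMAS AND PROOFS =====

-- Loop invariant: with a nonempty current block, A's loop emits the pending blocks, then
-- current extended to the next boundary, then B's blocks of the remainder.
theorem aGo_invariant (H : List Int)
    (items : List (Int × Int × Int × String × String × Int × Int)) :
    ∀ (blocks : List (List (Int × Int × Int × String × String × Int × Int)))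
      (current : List (Int × Int × Int × String × String × Int × Int)), current ≠ [] →
      aGo H items blocks current =
        blocks ++ ((current ++ items.takeWhile (fun y => !(H.contains y.2.2.2.2.2.2))) ::
          altGo H (items.dropWhile (fun y => !(H.contains y.2.2.2.2.2.2)))) := by
  induction items with
  | nil =>
      intro blocks current hc
      simp [aGo, hc, altGo]
  | cons x rest ih =>
      intro blocks current hc
      by_cases hx : x.2.2.2.2.2.2 ∈ H
      · rw [show aGo H (x :: rest) blocks current =
            aGo H rest (blocks ++ [current]) [x] by simp [aGo, hc, hx]]
        rw [ih (blocks ++ [current]) [x] (by simp)]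
        simp [List.takeWhile, List.dropWhile, hx, altGo]
      · rw [show aGo H (x :: rest) blocks current =
            aGo H rest blocks (current ++ [x]) by simp [aGo, hx]]
        rw [ih blocks (current ++ [x]) (by simp)]
        simp [List.takeWhile, List.dropWhile, hx]

-- ===== VERDICT (by name: the statement is the Claim_ definition above) =====
theorem split_on_heading_levels_py_spec : Claim_equal_split_on_heading_levels_py := by
  intro items H _
  unfold Spec_split_on_heading_levels_py split_on_heading_levels_py split_on_heading_levels_py_alt
  cases items with
  | nil => simp [aGo, altGo]
  | cons x rest =>
      rw [show aGo H (x :: rest) [] [] = aGo H rest [] [x] by simp [aGo]]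
      rw [aGo_invariant H rest [] [x] (by simp)]
      simp [altGo]
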